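-- pv_equiv track=rewrite | github.com/Helen-0407/IBI1_2025-26 | Practical7/stop_codons.py | has_in_frame_stop
-- ===== SOURCE A (Python) =====
-- def has_in_frame_stop(seq):
--     """Check for the presence of stop codons within the reading frame"""
--     start = "ATG"
--     stops = {"TAA", "TAG", "TGA"}
--     found_stops = set()
--
--     for i in range(len(seq) - 2):
--         if seq[i:i+3] == start:
--             for j in range(i, len(seq) - 2, 3):
--                 codon = seq[j:j+3]
--                 if codon in stops:
--                     found_stops.add(codon)
--             if found_stops:
--                 return True, sorted(list(found_stops))
--     return False, []
-- ===== SOURCE B (Python) =====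
-- def has_in_frame_stop(seq):
--     """Check for the presence of stop codons within the reading frame"""
--     stops = ("TAA", "TAG", "TGA")
--     n = len(seq)
--     # suffix stop-sets per position, as 3-bit masks, built right-to-left
--     masks = [0, 0, 0]
--     for j in range(n - 3, -1, -1):
--         m = masks[-3]
--         c = seq[j:j+3]
--         if c == "TAA":
--             m |= 1
--         elif c == "TAG":
--             m |= 2
--         elif c == "TGA":
--             m |= 4
--         masks.append(m)
--     masks.reverse()
--     for i in range(n - 2):
--         if seq[i:i+3] == "ATG" and masks[i]:
--             return True, [s for k, s in enumerate(stops) if masks[i] >> k & 1]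
--     return False, []
-- ===== Notes on version B (the rewrite author's own statement) =====
-- stated objective: alternative
-- what changed: Instead of rescanning the whole reading frame of every candidate ATG as A does, B makes one right-to-left pass storing per position a 3-bit mask of the distinct stop codons in that position's frame suffix, then a single left-to-right scan returns at the first ATG whose mask is non-zero.
import Mathlib
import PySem

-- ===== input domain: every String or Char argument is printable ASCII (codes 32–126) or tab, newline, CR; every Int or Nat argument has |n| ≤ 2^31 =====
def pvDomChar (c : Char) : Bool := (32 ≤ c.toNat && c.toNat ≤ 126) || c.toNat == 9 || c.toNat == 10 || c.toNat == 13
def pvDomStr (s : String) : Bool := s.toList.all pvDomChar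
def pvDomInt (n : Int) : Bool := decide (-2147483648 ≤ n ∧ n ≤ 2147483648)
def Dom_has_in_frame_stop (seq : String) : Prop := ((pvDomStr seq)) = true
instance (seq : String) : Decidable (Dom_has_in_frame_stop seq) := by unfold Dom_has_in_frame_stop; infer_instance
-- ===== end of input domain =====

-- B: instead of A's rescan of the reading frame of each candidate ATG, one right-to-left
-- pass stores per position a 3-bit mask of the stop codons in that position's frame suffix,
-- and a single left-to-right scan picks the first ATG whose mask is non-zero.

-- ===== PORT A =====
def pvStops : PySem.Set String := PySem.Set.ofList ["TAA", "TAG", "TGA"]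

def pvAInner (seq : String) (i : Int) (fs : PySem.Set String) : PySem.Set String :=
  (PySem.List.pyRange i (PySem.Str.len seq - 2) 3).foldl
    (fun fs j =>
      let codon := PySem.Str.slice seq (some j) (some (j + 3))
      if PySem.Set.contains pvStops codon then PySem.Set.add fs codon else fs) fs

def pvALoop (seq : String) (fs : PySem.Set String) : List Int → Bool × List String
  | [] => (false, [])
  | i :: rest =>
    if PySem.Str.slice seq (some i) (some (i + 3)) == "ATG" then
      let fs' := pvAInner seq i fs
      if fs' ≠ [] then (true, PySem.List.sorted fs' (fun x => x))
      else pvALoop seq fs' rest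
    else pvALoop seq fs rest

def has_in_frame_stop (seq : String) : Bool × List String :=
  pvALoop seq PySem.Set.empty (PySem.List.pyRange 0 (PySem.Str.len seq - 2))

-- ===== PORT B =====
-- masks is kept newest-first (Source B appends and reverses once at the end; the cons list
-- IS the reversed list, and Python's masks[-3] is the third newest element, getD 2).
def pvBStep (seq : String) (masks : List Nat) (j : Int) : List Nat :=
  let m := masks.getD 2 0
  let c := PySem.Str.slice seq (some j) (some (j + 3))
  let m := if c == "TAA" then m ||| 1
           else if c == "TAG" then m ||| 2
           else if c == "TGA" then m ||| 4
           else m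
  m :: masks

def pvBScan (seq : String) (masks : List Nat) : List Int → Bool × List String
  | [] => (false, [])
  | i :: rest =>
    let m := PySem.List.pyGetD masks i 0
    if (PySem.Str.slice seq (some i) (some (i + 3)) == "ATG") && (m != 0) then
      -- enumerate indices are 0,1,2 so the Python shift k ≥ 0 is exactly >>> p.1.toNat
      (true, ((PySem.List.enumerate ["TAA", "TAG", "TGA"]).filter
        (fun p => (m >>> p.1.toNat) &&& 1 != 0)).map (·.2))
    else pvBScan seq masks rest

def has_in_frame_stop_alt (seq : String) : Bool × List String :=
  let n := PySem.Str.len seq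
  let masks := (PySem.List.pyRange (n - 3) (-1) (-1)).foldl (pvBStep seq) [0, 0, 0]
  pvBScan seq masks (PySem.List.pyRange 0 (n - 2))

-- ===== PRECONDITION & SPEC =====
def Spec_has_in_frame_stop (seq : String) (out : Bool × List String) : Prop := out = has_in_frame_stop_alt seq
instance (seq : String) (out : Bool × List String) : Decidable (Spec_has_in_frame_stop seq out) := by unfold Spec_has_in_frame_stop; infer_instance

-- ===== CLAIM (what is proved, stated in full; the proofs are below) =====
def Claim_equal_has_in_frame_stop : Prop := ∀ (seq : String), Dom_has_in_frame_stop seq → Spec_has_in_frame_stop seq (has_in_frame_stop seq)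

-- ===== LEMMAS AND PROOFS =====

-- the suffix stop mask of position j, specified by recursion on the frame
def pvMask (seq : String) (j : Nat) : Nat :=
  if j + 3 ≤ seq.toList.length then
    let m := pvMask seq (j + 3)
    let c := PySem.Str.slice seq (some (j : Int)) (some ((j : Int) + 3))
    if c == "TAA" then m ||| 1
    else if c == "TAG" then m ||| 2
    else if c == "TGA" then m ||| 4
    else m
  else 0
termination_by seq.toList.length - j
decreasing_by simp only [String.length_toList] at *; omega

lemma pvMask_lt (seq : String) (j : Nat) : pvMask seq j < 8 := by
  fun_induction pvMask seq j with
  | _ =>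
    first
      | decide
      | (rename_i ih; exact Nat.or_lt_two_pow (n := 3) ih (by decide))
      | (rename_i ih _; exact Nat.or_lt_two_pow (n := 3) ih (by decide))
      | assumption

-- membership in A's inner fold
lemma pvAInner_mem (seq : String) (js : List Int) (fs : PySem.Set String) (s : String) :
    s ∈ js.foldl
      (fun fs j =>
        let codon := PySem.Str.slice seq (some j) (some (j + 3))
        if PySem.Set.contains pvStops codon then PySem.Set.add fs codon else fs) fs ↔
    s ∈ fs ∨ ∃ j ∈ js, PySem.Str.slice seq (some j) (some (j + 3)) = s ∧
      (s = "TAA" ∨ s = "TAG" ∨ s = "TGA") := by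
  induction js generalizing fs with
  | nil => simp
  | cons j js ih =>
    simp only [List.foldl_cons]
    rw [ih]
    by_cases hc : PySem.Set.contains pvStops (PySem.Str.slice seq (some j) (some (j + 3))) = true
    · have hmem : PySem.Str.slice seq (some j) (some (j + 3)) = "TAA" ∨
          PySem.Str.slice seq (some j) (some (j + 3)) = "TAG" ∨
          PySem.Str.slice seq (some j) (some (j + 3)) = "TGA" := by
        have h2 := List.mem_of_elem_eq_true hc
        have h3 : pvStops = ["TAA", "TAG", "TGA"] := by decide
        rw [h3] at h2
        simpa using h2
      simp only [hc, if_pos, PySem.Set.mem_add]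
      constructor
      · rintro (⟨h | rfl⟩ | ⟨x, hx, h1, h2⟩)
        · exact .inl h
        · exact .inr ⟨j, by simp, rfl, hmem⟩
        · exact .inr ⟨x, by simp [hx], h1, h2⟩
      · rintro (h | ⟨x, hx, h1, h2⟩)
        · exact .inl (.inl h)
        · rcases List.mem_cons.mp hx with rfl | hx
          · exact .inl (.inr h1.symm)
          · exact .inr ⟨x, hx, h1, h2⟩
    · simp only [hc, if_neg, Bool.false_eq_true, not_false_iff]
      have hnot : ¬ (PySem.Str.slice seq (some j) (some (j + 3)) = "TAA" ∨
          PySem.Str.slice seq (some j) (some (j + 3)) = "TAG" ∨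
          PySem.Str.slice seq (some j) (some (j + 3)) = "TGA") := by
        intro h
        apply hc
        have h3 : pvStops = ["TAA", "TAG", "TGA"] := by decide
        apply List.elem_eq_true_of_mem
        rw [h3]
        simpa using h
      constructor
      · rintro (h | ⟨x, hx, h1, h2⟩)
        · exact .inl h
        · exact .inr ⟨x, by simp [hx], h1, h2⟩
      · rintro (h | ⟨x, hx, h1, h2⟩)
        · exact .inl h
        · rcases List.mem_cons.mp hx with rfl | hx
          · exact absurd (h1 ▸ h2) hnot
          · exact .inr ⟨x, hx, h1, h2⟩

lemma pvAInner_nodup (seq : String) (js : List Int) (fs : PySem.Set String)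
    (h : fs.Nodup) :
    (js.foldl
      (fun fs j =>
        let codon := PySem.Str.slice seq (some j) (some (j + 3))
        if PySem.Set.contains pvStops codon then PySem.Set.add fs codon else fs) fs).Nodup := by
  induction js generalizing fs with
  | nil => exact h
  | cons j js ih =>
    simp only [List.foldl_cons]
    apply ih
    split
    · exact PySem.Set.nodup_add _ _ h
    · exact h

lemma pvFrameSplit (N j : Int) (P : Int → Prop) (h3 : j + 3 ≤ N) :
    (∃ x : Int, j ≤ x ∧ x < N - 2 ∧ (3 : Int) ∣ x - j ∧ P x) ↔
      (P j ∨ ∃ x : Int, j + 3 ≤ x ∧ x < N - 2 ∧ (3 : Int) ∣ x - (j + 3) ∧ P x) := by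
  constructor
  · rintro ⟨x, h1, h2, hd, hp⟩
    by_cases hx : x = j
    · exact .inl (hx ▸ hp)
    · exact .inr ⟨x, by omega, h2, by omega, hp⟩
  · rintro (hp | ⟨x, h1, h2, hd, hp⟩)
    · exact ⟨j, by omega, by omega, by omega, hp⟩
    · exact ⟨x, by omega, h2, by omega, hp⟩

-- bit t of pvMask j ↔ the t-th stop codon occurs in the frame of j
lemma pvMask_testBit (seq : String) (j : Nat) (t : Nat) (w : String)
    (hw : (t = 0 ∧ w = "TAA") ∨ (t = 1 ∧ w = "TAG") ∨ (t = 2 ∧ w = "TGA")) :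
    (pvMask seq j).testBit t = true ↔
      ∃ x : Int, (j : Int) ≤ x ∧ x < (seq.toList.length : Int) - 2 ∧ (3 : Int) ∣ x - j ∧
        PySem.Str.slice seq (some x) (some (x + 3)) = w := by
  fun_induction pvMask seq j with
  | case1 j h m c hcond ih | case2 j h m c h1 hcond ih | case3 j h m c h1 h2 hcond ih =>
    push_cast at ih
    rw [pvFrameSplit ((seq.toList.length : Int)) (j : Int) _ (by push_cast; omega), ← ih]
    have hceq : PySem.Str.slice seq (some (j : Int)) (some ((j : Int) + 3)) = _ := eq_of_beq hcond
    rcases hw with ⟨rfl, rfl⟩ | ⟨rfl, rfl⟩ | ⟨rfl, rfl⟩ <;>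
      simp [Nat.testBit_or, hceq,
        show Nat.testBit 1 0 = true from rfl, show Nat.testBit 1 1 = false from rfl,
        show Nat.testBit 1 2 = false from rfl, show Nat.testBit 2 0 = false from rfl,
        show Nat.testBit 2 1 = true from rfl, show Nat.testBit 2 2 = false from rfl,
        show Nat.testBit 4 0 = false from rfl, show Nat.testBit 4 1 = false from rfl,
        show Nat.testBit 4 2 = true from rfl] <;> rfl
  | case4 j h m c h1 h2 h3 ih =>
    push_cast at ih
    rw [pvFrameSplit ((seq.toList.length : Int)) (j : Int) _ (by push_cast; omega), ← ih]
    have g1 : PySem.Str.slice seq (some (j : Int)) (some ((j : Int) + 3)) ≠ "TAA" :=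
      fun hh => h1 (beq_iff_eq.mpr hh)
    have g2 : PySem.Str.slice seq (some (j : Int)) (some ((j : Int) + 3)) ≠ "TAG" :=
      fun hh => h2 (beq_iff_eq.mpr hh)
    have g3 : PySem.Str.slice seq (some (j : Int)) (some ((j : Int) + 3)) ≠ "TGA" :=
      fun hh => h3 (beq_iff_eq.mpr hh)
    rcases hw with ⟨rfl, rfl⟩ | ⟨rfl, rfl⟩ | ⟨rfl, rfl⟩ <;> simp [g1, g2, g3] <;> rfl
  | case5 j h =>
    rcases hw with ⟨rfl, rfl⟩ | ⟨rfl, rfl⟩ | ⟨rfl, rfl⟩ <;>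
      · simp only [Nat.zero_testBit, Bool.false_eq_true, false_iff]
        rintro ⟨x, h1, h2, h3, h4⟩
        omega

lemma pvDescRange (N : Nat) (h : 3 ≤ N) :
    PySem.List.pyRange ((N : Int) - 3) (-1) (-1)
      = (List.range (N - 2)).map (fun k : Nat => (N : Int) - 3 + -1 * (k : Int)) := by
  rw [PySem.List.pyRange, if_neg (by norm_num), if_neg (by norm_num), if_pos (by omega)]
  have hcnt : ((((N : Int) - 3) - (-1) + (-(-1)) - 1) / (-(-1))).toNat = N - 2 := by
    norm_num
    omega
  simp only [hcnt]

-- B's backward pass computes pvMask at every position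
lemma pvBuild_getD (seq : String) (k : Nat) :
    ((PySem.List.pyRange (PySem.Str.len seq - 3) (-1) (-1)).foldl (pvBStep seq) [0, 0, 0]).getD k 0
      = pvMask seq k := by
  rw [PySem.Str.len_eq]
  by_cases hN : 3 ≤ seq.toList.length
  · rw [pvDescRange seq.toList.length hN]
    have main : ∀ c, c ≤ seq.toList.length - 2 → ∀ k,
        ((((List.range c).map (fun k' : Nat => (seq.toList.length : Int) - 3 + -1 * (k' : Int))).foldl
          (pvBStep seq) [0, 0, 0]).getD k 0)
          = pvMask seq (seq.toList.length - 2 - c + k) := by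
      intro c
      induction c with
      | zero =>
        intro _ k
        have hz : pvMask seq (seq.toList.length - 2 - 0 + k) = 0 := by
          rw [pvMask, if_neg (by omega)]
        rw [hz]
        rcases k with _ | _ | _ | k <;> simp [List.getD]
      | succ c ih =>
        intro hc k
        rw [List.range_succ, List.map_append, List.foldl_append]
        simp only [List.map_cons, List.map_nil, List.foldl_cons, List.foldl_nil]
        have hj : (seq.toList.length : Int) - 3 + -1 * (c : Int)
            = ((seq.toList.length - 3 - c : Nat) : Int) := by omega
        rw [pvBStep, hj]
        rcases k with _ | k
        · show _ = pvMask seq (seq.toList.length - 2 - (c + 1) + 0)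
          have he : seq.toList.length - 2 - (c + 1) + 0 = seq.toList.length - 3 - c := by omega
          rw [he, pvMask]
          rw [if_pos (show seq.toList.length - 3 - c + 3 ≤ seq.toList.length by omega)]
          have hm : (((List.range c).map (fun k' : Nat => (seq.toList.length : Int) - 3 + -1 * (k' : Int))).foldl
              (pvBStep seq) [0, 0, 0]).getD 2 0
              = pvMask seq (seq.toList.length - 3 - c + 3) := by
            rw [ih (by omega) 2]
            congr 1
            omega
          simp only [List.getD_cons_zero, hm]
        · show (_ :: _).getD (k + 1) 0 = _
          rw [List.getD_cons_succ, ih (by omega) k]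
          congr 1
          omega
    have h2 := main (seq.toList.length - 2) le_rfl k
    have h0 : seq.toList.length - 2 - (seq.toList.length - 2) + k = k := by omega
    rw [h0] at h2
    exact h2
  · have hr : PySem.List.pyRange ((seq.toList.length : Int) - 3) (-1) (-1) = [] := by
      rw [PySem.List.pyRange, if_neg (by norm_num), if_neg (by norm_num), if_neg (by omega)]
      simp
    rw [hr]
    rw [pvMask, if_neg (by omega)]
    rcases k with _ | _ | _ | k <;> simp [List.getD]

lemma pvList_eq (S : List String) (m : Nat) (h8 : m < 8) (hnd : S.Nodup)
    (hmem : ∀ s, s ∈ S ↔ ((s = "TAA" ∧ m.testBit 0 = true) ∨ (s = "TAG" ∧ m.testBit 1 = true) ∨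
      (s = "TGA" ∧ m.testBit 2 = true))) :
    (S = [] ↔ m = 0) ∧ (m ≠ 0 → PySem.List.sorted S (fun x => x) =
      ((PySem.List.enumerate ["TAA", "TAG", "TGA"]).filter
        (fun p => (m >>> p.1.toNat) &&& 1 != 0)).map (·.2)) := by
  interval_cases m
  · refine ⟨⟨fun _ => rfl, fun _ => ?_⟩, by simp⟩
    rw [List.eq_nil_iff_forall_not_mem]
    intro s hs
    rcases (hmem s).mp hs with ⟨_, hb⟩ | ⟨_, hb⟩ | ⟨_, hb⟩ <;> simp at hb
  · refine ⟨⟨fun hS => ?_, by omega⟩, fun _ => ?_⟩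
    · have hww := (hmem "TAA").mpr (Or.inl ⟨rfl, by decide⟩)
      rw [hS] at hww
      simp at hww
    · have hL : ((PySem.List.enumerate ["TAA", "TAG", "TGA"]).filter
          (fun p => ((1 : Nat) >>> p.1.toNat) &&& 1 != 0)).map (·.2) = ["TAA"] := by decide
      rw [hL]
      apply PySem.List.sorted_eq_of_perm_of_pairwise_lt
      · refine (List.perm_ext_iff_of_nodup (by decide) hnd).mpr ?_
        intro s
        rw [hmem s]
        simp [show Nat.testBit 1 0 = true from rfl, show Nat.testBit 1 1 = false from rfl, show Nat.testBit 1 2 = false from rfl]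
        try tauto
      · exact List.pairwise_singleton _ _
  · refine ⟨⟨fun hS => ?_, by omega⟩, fun _ => ?_⟩
    · have hww := (hmem "TAG").mpr (Or.inr (Or.inl ⟨rfl, by decide⟩))
      rw [hS] at hww
      simp at hww
    · have hL : ((PySem.List.enumerate ["TAA", "TAG", "TGA"]).filter
          (fun p => ((2 : Nat) >>> p.1.toNat) &&& 1 != 0)).map (·.2) = ["TAG"] := by decide
      rw [hL]
      apply PySem.List.sorted_eq_of_perm_of_pairwise_lt
      · refine (List.perm_ext_iff_of_nodup (by decide) hnd).mpr ?_
        intro s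
        rw [hmem s]
        simp [show Nat.testBit 2 0 = false from rfl, show Nat.testBit 2 1 = true from rfl, show Nat.testBit 2 2 = false from rfl]
        try tauto
      · exact List.pairwise_singleton _ _
  · refine ⟨⟨fun hS => ?_, by omega⟩, fun _ => ?_⟩
    · have hww := (hmem "TAA").mpr (Or.inl ⟨rfl, by decide⟩)
      rw [hS] at hww
      simp at hww
    · have hL : ((PySem.List.enumerate ["TAA", "TAG", "TGA"]).filter
          (fun p => ((3 : Nat) >>> p.1.toNat) &&& 1 != 0)).map (·.2) = ["TAA", "TAG"] := by decide
      rw [hL]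
      apply PySem.List.sorted_eq_of_perm_of_pairwise_lt
      · refine (List.perm_ext_iff_of_nodup (by decide) hnd).mpr ?_
        intro s
        rw [hmem s]
        simp [show Nat.testBit 3 0 = true from rfl, show Nat.testBit 3 1 = true from rfl, show Nat.testBit 3 2 = false from rfl]
        try tauto
      · simp [String.lt_iff_toList_lt]
        decide
  · refine ⟨⟨fun hS => ?_, by omega⟩, fun _ => ?_⟩
    · have hww := (hmem "TGA").mpr (Or.inr (Or.inr ⟨rfl, by decide⟩))
      rw [hS] at hww
      simp at hww
    · have hL : ((PySem.List.enumerate ["TAA", "TAG", "TGA"]).filter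
          (fun p => ((4 : Nat) >>> p.1.toNat) &&& 1 != 0)).map (·.2) = ["TGA"] := by decide
      rw [hL]
      apply PySem.List.sorted_eq_of_perm_of_pairwise_lt
      · refine (List.perm_ext_iff_of_nodup (by decide) hnd).mpr ?_
        intro s
        rw [hmem s]
        simp [show Nat.testBit 4 0 = false from rfl, show Nat.testBit 4 1 = false from rfl, show Nat.testBit 4 2 = true from rfl]
        try tauto
      · exact List.pairwise_singleton _ _
  · refine ⟨⟨fun hS => ?_, by omega⟩, fun _ => ?_⟩
    · have hww := (hmem "TAA").mpr (Or.inl ⟨rfl, by decide⟩)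
      rw [hS] at hww
      simp at hww
    · have hL : ((PySem.List.enumerate ["TAA", "TAG", "TGA"]).filter
          (fun p => ((5 : Nat) >>> p.1.toNat) &&& 1 != 0)).map (·.2) = ["TAA", "TGA"] := by decide
      rw [hL]
      apply PySem.List.sorted_eq_of_perm_of_pairwise_lt
      · refine (List.perm_ext_iff_of_nodup (by decide) hnd).mpr ?_
        intro s
        rw [hmem s]
        simp [show Nat.testBit 5 0 = true from rfl, show Nat.testBit 5 1 = false from rfl, show Nat.testBit 5 2 = true from rfl]
        try tauto
      · simp [String.lt_iff_toList_lt]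
        decide
  · refine ⟨⟨fun hS => ?_, by omega⟩, fun _ => ?_⟩
    · have hww := (hmem "TAG").mpr (Or.inr (Or.inl ⟨rfl, by decide⟩))
      rw [hS] at hww
      simp at hww
    · have hL : ((PySem.List.enumerate ["TAA", "TAG", "TGA"]).filter
          (fun p => ((6 : Nat) >>> p.1.toNat) &&& 1 != 0)).map (·.2) = ["TAG", "TGA"] := by decide
      rw [hL]
      apply PySem.List.sorted_eq_of_perm_of_pairwise_lt
      · refine (List.perm_ext_iff_of_nodup (by decide) hnd).mpr ?_
        intro s
        rw [hmem s]
        simp [show Nat.testBit 6 0 = false from rfl, show Nat.testBit 6 1 = true from rfl, show Nat.testBit 6 2 = true from rfl]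
        try tauto
      · simp [String.lt_iff_toList_lt]
        decide
  · refine ⟨⟨fun hS => ?_, by omega⟩, fun _ => ?_⟩
    · have hww := (hmem "TAA").mpr (Or.inl ⟨rfl, by decide⟩)
      rw [hS] at hww
      simp at hww
    · have hL : ((PySem.List.enumerate ["TAA", "TAG", "TGA"]).filter
          (fun p => ((7 : Nat) >>> p.1.toNat) &&& 1 != 0)).map (·.2) = ["TAA", "TAG", "TGA"] := by decide
      rw [hL]
      apply PySem.List.sorted_eq_of_perm_of_pairwise_lt
      · refine (List.perm_ext_iff_of_nodup (by decide) hnd).mpr ?_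
        intro s
        rw [hmem s]
        simp [show Nat.testBit 7 0 = true from rfl, show Nat.testBit 7 1 = true from rfl, show Nat.testBit 7 2 = true from rfl]
        try tauto
      · simp [String.lt_iff_toList_lt]
        decide

lemma pvSmem (seq : String) (i : Int) (hi : 0 ≤ i) (s : String) :
    s ∈ pvAInner seq i PySem.Set.empty ↔
      ((s = "TAA" ∧ (pvMask seq i.toNat).testBit 0 = true) ∨
       (s = "TAG" ∧ (pvMask seq i.toNat).testBit 1 = true) ∨
       (s = "TGA" ∧ (pvMask seq i.toNat).testBit 2 = true)) := by
  have hcast : ((i.toNat : Int)) = i := Int.toNat_of_nonneg hi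
  have hb : ∀ (t : Nat) (w : String),
      ((t = 0 ∧ w = "TAA") ∨ (t = 1 ∧ w = "TAG") ∨ (t = 2 ∧ w = "TGA")) →
      ((pvMask seq i.toNat).testBit t = true ↔
        ∃ j ∈ PySem.List.pyRange i (PySem.Str.len seq - 2) 3,
          PySem.Str.slice seq (some j) (some (j + 3)) = w) := by
    intro t w hw
    rw [pvMask_testBit seq i.toNat t w hw, hcast]
    constructor
    · rintro ⟨x, h1, h2, h3, h4⟩
      refine ⟨x, ?_, h4⟩
      rw [PySem.List.mem_pyRange_iff_of_pos (by norm_num), PySem.Str.len_eq]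
      exact ⟨h1, by omega, h3⟩
    · rintro ⟨j, hj, h4⟩
      rw [PySem.List.mem_pyRange_iff_of_pos (by norm_num), PySem.Str.len_eq] at hj
      exact ⟨j, hj.1, by omega, hj.2.2, h4⟩
  rw [pvAInner, pvAInner_mem]
  constructor
  · rintro (h | ⟨j, hj, hsl, rfl | rfl | rfl⟩)
    · simp at h
    · exact .inl ⟨rfl, (hb 0 "TAA" (by simp)).mpr ⟨j, hj, hsl⟩⟩
    · exact .inr (.inl ⟨rfl, (hb 1 "TAG" (by simp)).mpr ⟨j, hj, hsl⟩⟩)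
    · exact .inr (.inr ⟨rfl, (hb 2 "TGA" (by simp)).mpr ⟨j, hj, hsl⟩⟩)
  · rintro (⟨rfl, hbit⟩ | ⟨rfl, hbit⟩ | ⟨rfl, hbit⟩)
    · obtain ⟨j, hj, hsl⟩ := (hb 0 "TAA" (by simp)).mp hbit
      exact .inr ⟨j, hj, hsl, .inl rfl⟩
    · obtain ⟨j, hj, hsl⟩ := (hb 1 "TAG" (by simp)).mp hbit
      exact .inr ⟨j, hj, hsl, .inr (.inl rfl)⟩
    · obtain ⟨j, hj, hsl⟩ := (hb 2 "TGA" (by simp)).mp hbit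
      exact .inr ⟨j, hj, hsl, .inr (.inr rfl)⟩

lemma pvFrame (seq : String) (i : Int) (hi : 0 ≤ i) :
    (pvAInner seq i PySem.Set.empty = [] ↔ pvMask seq i.toNat = 0) ∧
      (pvMask seq i.toNat ≠ 0 → PySem.List.sorted (pvAInner seq i PySem.Set.empty) (fun x => x) =
        ((PySem.List.enumerate ["TAA", "TAG", "TGA"]).filter
          (fun p => ((pvMask seq i.toNat) >>> p.1.toNat) &&& 1 != 0)).map (·.2)) :=
  pvList_eq _ _ (pvMask_lt seq i.toNat) (pvAInner_nodup seq _ _ List.nodup_nil) (pvSmem seq i hi)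

-- per-index agreement of the two loops
lemma pvLoop_eq (seq : String) (masks : List Nat)
    (hm : ∀ k, masks.getD k 0 = pvMask seq k) :
    ∀ l : List Int, (∀ i ∈ l, 0 ≤ i) →
      pvALoop seq PySem.Set.empty l = pvBScan seq masks l := by
  intro l
  induction l with
  | nil => intro _; rfl
  | cons i rest ih =>
    intro hpos
    have hi : 0 ≤ i := hpos i (by simp)
    have hrest : ∀ x ∈ rest, (0 : Int) ≤ x := fun x hx => hpos x (List.mem_cons_of_mem _ hx)
    have hget : PySem.List.pyGetD masks i 0 = pvMask seq i.toNat := by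
      rw [PySem.List.pyGetD_of_nonneg masks 0 hi, hm]
    rw [pvALoop, pvBScan]
    obtain ⟨h1, h2⟩ := pvFrame seq i hi
    by_cases hA : (PySem.Str.slice seq (some i) (some (i + 3)) == "ATG") = true
    · by_cases hz : pvMask seq i.toNat = 0
      · have hS : pvAInner seq i PySem.Set.empty = [] := h1.mpr hz
        simp only [hA, hS, hget, hz, ne_eq, not_true_eq_false, if_false, bne_self_eq_false,
          Bool.and_false, if_true, Bool.false_eq_true]
        exact ih hrest
      · have hS : pvAInner seq i PySem.Set.empty ≠ [] := fun h => hz (h1.mp h)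
        have hmne : (pvMask seq i.toNat != 0) = true := by simpa using hz
        simp only [hA, hget, hmne, Bool.and_true, ne_eq, hS, not_false_iff, if_true, Bool.true_and]
        rw [h2 hz]
    · have hA' : (PySem.Str.slice seq (some i) (some (i + 3)) == "ATG") = false := by
        simpa using hA
      simp only [hA', Bool.false_and, Bool.false_eq_true, if_false]
      exact ih hrest

-- ===== VERDICT (by name: the statement is the Claim_ definition above) =====
theorem has_in_frame_stop_spec : Claim_equal_has_in_frame_stop := by
  intro seq _
  unfold Spec_has_in_frame_stop has_in_frame_stop has_in_frame_stop_alt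
  exact pvLoop_eq seq _ (pvBuild_getD seq) _ (fun i hi => (PySem.List.mem_pyRange_one.mp hi).1)
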